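-- pv_equiv track=rewrite | github.com/aroig/cookiecutter-latex-paper | paper/{{cookiecutter.project_name}}/bin/mkpreamble.py | format_authorlist
-- ===== SOURCE A (Python) =====
-- def format_entry(pattern, *values):
--     if all(values): return pattern % values
--     else:           return ''
--
-- def format_authorlist(authors):
--     L = []
--     for a in authors:
--         L.append(r'  \vspace{1em}')
--         L.append(r'  \parbox[t]{0.5\textwidth}{')
--         L.append(format_entry(r'    \textbf{%s}\\',       a.get('name',None)))
--         L.append(format_entry(r'    \texttt{%s}\\',       a.get('email',None)))
--         L.append(format_entry(r'    \texttt{\url{%s}}\\', a.get('web',None)))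
--         L.append(r'    \\')
--         L.append(format_entry(r'    %s\\',                a.get('university',None)))
--         L.append(format_entry(r'    %s\\',                a.get('department',None)))
--         L.append(format_entry(r'    %s\\',                a.get('address',None)))
--         L.append(format_entry(r'    %s\\',                a.get('city',None)))
--         L.append('  }')
--
--     return '\n'.join(L)
-- ===== SOURCE B (Python) =====
-- def _line(a, key, pre, post):
--     v = a.get(key)
--     return (pre + v + post if v else '') + '\n'
--
-- def _block(a):
--     return ('  \\vspace{1em}\n'
--             '  \\parbox[t]{0.5\\textwidth}{\n'
--             + _line(a, 'name', '    \\textbf{', '}\\\\')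
--             + _line(a, 'email', '    \\texttt{', '}\\\\')
--             + _line(a, 'web', '    \\texttt{\\url{', '}}\\\\')
--             + '    \\\\\n'
--             + _line(a, 'university', '    ', '\\\\')
--             + _line(a, 'department', '    ', '\\\\')
--             + _line(a, 'address', '    ', '\\\\')
--             + _line(a, 'city', '    ', '\\\\')
--             + '  }')
--
-- def format_authorlist(authors):
--     if not authors:
--         return ''
--     if len(authors) == 1:
--         return _block(authors[0])
--     return _block(authors[0]) + '\n' + format_authorlist(authors[1:])
-- ===== Notes on version B (the rewrite author's own statement) =====
-- stated objective: alternative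
-- what changed: B builds the result recursively by direct string concatenation - each author block is one string with newlines baked in and blocks are glued with '\n' in the recursion - instead of A's iterative accumulation of a flat list of lines finished by a single '\n'.join.
import Mathlib
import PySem

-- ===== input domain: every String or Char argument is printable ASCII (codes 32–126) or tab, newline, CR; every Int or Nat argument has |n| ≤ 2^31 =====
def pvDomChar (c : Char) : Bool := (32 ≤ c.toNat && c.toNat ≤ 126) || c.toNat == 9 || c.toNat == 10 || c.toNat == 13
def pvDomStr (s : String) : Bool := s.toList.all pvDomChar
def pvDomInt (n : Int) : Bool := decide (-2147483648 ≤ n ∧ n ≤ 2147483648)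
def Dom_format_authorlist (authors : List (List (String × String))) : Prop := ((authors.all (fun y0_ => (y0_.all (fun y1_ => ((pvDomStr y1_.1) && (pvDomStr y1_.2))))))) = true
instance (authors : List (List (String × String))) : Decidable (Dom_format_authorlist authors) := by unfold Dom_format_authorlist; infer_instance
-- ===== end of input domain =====

-- B builds the result recursively by direct string concatenation (each author block one
-- string with newlines baked in, blocks glued with '\n' in the recursion) instead of A's
-- iterative accumulation of a flat line list finished by one '\n'.join; objective: alternative.

-- a.get(k, None) on the assoc-list dict representation (first match wins)
def dictGet (a : List (String × String)) (k : String) : Option String :=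
  (a.find? (fun p => p.1 == k)).map (fun p => p.2)

-- ===== PORT A =====
-- Each pattern has exactly one '%s'; 'pattern % (v,)' is pre ++ v ++ post (exact for these patterns).
-- format_entry: all((v,)) is truthiness of the single value (None or "" falsy).
def fmtEntry (pre post : String) (v : Option String) : String :=
  match v with
  | some s => if s = "" then "" else pre ++ s ++ post
  | none => ""

def format_authorlist (authors : List (List (String × String))) : String :=
  let L : List String := authors.foldl (fun L a =>
    L ++ ["  \\vspace{1em}",
          "  \\parbox[t]{0.5\\textwidth}{",
          fmtEntry "    \\textbf{" "}\\\\" (dictGet a "name"),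
          fmtEntry "    \\texttt{" "}\\\\" (dictGet a "email"),
          fmtEntry "    \\texttt{\\url{" "}}\\\\" (dictGet a "web"),
          "    \\\\",
          fmtEntry "    " "\\\\" (dictGet a "university"),
          fmtEntry "    " "\\\\" (dictGet a "department"),
          fmtEntry "    " "\\\\" (dictGet a "address"),
          fmtEntry "    " "\\\\" (dictGet a "city"),
          "  }"]) []
  PySem.Str.join "\n" L

-- ===== PORT B =====
-- (pre + v + post if v else '') + '\n'
def altLine (a : List (String × String)) (key pre post : String) : String :=
  (match dictGet a key with
   | some v => if v = "" then "" else pre ++ v ++ post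
   | none => "") ++ "\n"

def altBlock (a : List (String × String)) : String :=
  "  \\vspace{1em}\n  \\parbox[t]{0.5\\textwidth}{\n"
    ++ altLine a "name" "    \\textbf{" "}\\\\"
    ++ altLine a "email" "    \\texttt{" "}\\\\"
    ++ altLine a "web" "    \\texttt{\\url{" "}}\\\\"
    ++ "    \\\\\n"
    ++ altLine a "university" "    " "\\\\"
    ++ altLine a "department" "    " "\\\\"
    ++ altLine a "address" "    " "\\\\"
    ++ altLine a "city" "    " "\\\\"
    ++ "  }"

def format_authorlist_alt (authors : List (List (String × String))) : String :=
  match authors with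
  | [] => ""
  | [a] => altBlock a
  | a :: rest => altBlock a ++ "\n" ++ format_authorlist_alt rest

-- ===== PRECONDITION & SPEC =====
def Spec_format_authorlist (authors : List (List (String × String))) (out : String) : Prop := out = format_authorlist_alt authors
instance (authors : List (List (String × String))) (out : String) : Decidable (Spec_format_authorlist authors out) := by unfold Spec_format_authorlist; infer_instance

-- ===== CLAIM =====
def Claim_equal_format_authorlist : Prop := ∀ (authors : List (List (String × String))), Dom_format_authorlist authors → Spec_format_authorlist authors (format_authorlist authors)

-- ===== LEMMAS AND PROOFS =====

def aLines (a : List (String × String)) : List String :=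
  ["  \\vspace{1em}",
   "  \\parbox[t]{0.5\\textwidth}{",
   fmtEntry "    \\textbf{" "}\\\\" (dictGet a "name"),
   fmtEntry "    \\texttt{" "}\\\\" (dictGet a "email"),
   fmtEntry "    \\texttt{\\url{" "}}\\\\" (dictGet a "web"),
   "    \\\\",
   fmtEntry "    " "\\\\" (dictGet a "university"),
   fmtEntry "    " "\\\\" (dictGet a "department"),
   fmtEntry "    " "\\\\" (dictGet a "address"),
   fmtEntry "    " "\\\\" (dictGet a "city"),
   "  }"]

theorem foldl_eq_flatMap (authors : List (List (String × String))) (acc : List String) :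
    authors.foldl (fun L a => L ++ aLines a) acc = acc ++ authors.flatMap aLines := by
  induction authors generalizing acc with
  | nil => simp
  | cons a rest ih => simp [List.foldl_cons, ih, List.append_assoc]

theorem str_join_cons_cons (x y : String) (L : List String) :
    PySem.Str.join "\n" (x :: y :: L) = x ++ "\n" ++ PySem.Str.join "\n" (y :: L) := by
  simp [PySem.Str.join, PySem.Chars.join_cons_cons, String.ext_iff]

theorem str_join_single (x : String) : PySem.Str.join "\n" [x] = x := by
  simp [PySem.Str.join, PySem.Chars.join_singleton]

theorem join_aLines (a : List (String × String)) :
    PySem.Str.join "\n" (aLines a) = altBlock a := by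
  simp only [aLines, str_join_cons_cons, str_join_single, altBlock, altLine, fmtEntry,
    String.ext_iff]
  simp

theorem join_aLines_cons (a : List (String × String)) (y : String) (t : List String) :
    PySem.Str.join "\n" (aLines a ++ y :: t)
      = altBlock a ++ "\n" ++ PySem.Str.join "\n" (y :: t) := by
  simp only [aLines, List.cons_append, List.nil_append, str_join_cons_cons, altBlock, altLine,
    fmtEntry, String.ext_iff]
  simp

theorem join_flatMap (authors : List (List (String × String))) :
    PySem.Str.join "\n" (authors.flatMap aLines) = format_authorlist_alt authors := by
  induction authors with
  | nil => rfl
  | cons a rest ih =>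
    cases rest with
    | nil => simp [format_authorlist_alt, join_aLines]
    | cons b more =>
      obtain ⟨t, ht⟩ : ∃ t, (b :: more).flatMap aLines = "  \\vspace{1em}" :: t :=
        ⟨(aLines b).tail ++ more.flatMap aLines, by simp [aLines]⟩
      calc PySem.Str.join "\n" ((a :: b :: more).flatMap aLines)
          = PySem.Str.join "\n" (aLines a ++ "  \\vspace{1em}" :: t) := by
            rw [← ht]; simp
        _ = altBlock a ++ "\n" ++ PySem.Str.join "\n" ("  \\vspace{1em}" :: t) :=
            join_aLines_cons a _ t
        _ = altBlock a ++ "\n" ++ format_authorlist_alt (b :: more) := by rw [← ht, ih]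
        _ = format_authorlist_alt (a :: b :: more) := by simp [format_authorlist_alt]

-- ===== VERDICT =====
theorem format_authorlist_spec : Claim_equal_format_authorlist := by
  intro authors _
  unfold Spec_format_authorlist format_authorlist
  show PySem.Str.join "\n" (authors.foldl (fun L a => L ++ aLines a) []) = _
  rw [foldl_eq_flatMap authors [], List.nil_append, join_flatMap]
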